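-- pv_equiv track=rewrite | github.com/HBXK/DataAug | Project.py | generate_invar_basis_keys_3D
-- ===== SOURCE A (Python) =====
-- def generate_invar_basis_keys_3D(degree):
--     """
--     Generate constrained basis keys with m1 + m2 + m3 = 0 and l1+l2+l3 <= degree.
--
--     Returns:
--         keys: list of (l1, l2, l3, m1, m2, m3)
--     """
--     keys = []
--     for l1 in range(degree + 1):
--         for l2 in range(degree + 1 - l1):
--             for l3 in range(degree + 1 - l1 - l2):
--                 for m1 in range(-l1, l1 + 1):
--                     for m2 in range(-l2, l2 + 1):
--                         m3 = -(m1 + m2)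
--                         if -l3 <= m3 <= l3:
--                             keys.append((l1, l2, l3, m1, m2, m3))
--     return keys
-- ===== SOURCE B (Python) =====
-- def generate_invar_basis_keys_3D(degree):
--     """
--     Generate constrained basis keys with m1 + m2 + m3 = 0 and l1+l2+l3 <= degree.
--
--     Returns:
--         keys: list of (l1, l2, l3, m1, m2, m3)
--     """
--     pairs = [(l, m) for l in range(degree + 1) for m in range(-l, l + 1)]
--     keys = []
--     for l1, m1 in pairs:
--         for l2, m2 in pairs:
--             s = abs(m1 + m2)
--             for l3 in range(s, degree + 1 - l1 - l2):
--                 keys.append((l1, l2, l3, m1, m2, -(m1 + m2)))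
--     keys.sort()
--     return keys
-- ===== Notes on version B (the rewrite author's own statement) =====
-- stated objective: alternative
-- what changed: B precomputes the flat (l,m) pair list once, enumerates in (l1,m1),(l2,m2) pair order with l3 derived directly from abs(m1+m2) (no rejected candidates, no l3-outer loop), and restores A's emission order with a single final sort; proved equal via a permutation argument plus strict lexicographic sortedness of A's output.
import Mathlib
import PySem

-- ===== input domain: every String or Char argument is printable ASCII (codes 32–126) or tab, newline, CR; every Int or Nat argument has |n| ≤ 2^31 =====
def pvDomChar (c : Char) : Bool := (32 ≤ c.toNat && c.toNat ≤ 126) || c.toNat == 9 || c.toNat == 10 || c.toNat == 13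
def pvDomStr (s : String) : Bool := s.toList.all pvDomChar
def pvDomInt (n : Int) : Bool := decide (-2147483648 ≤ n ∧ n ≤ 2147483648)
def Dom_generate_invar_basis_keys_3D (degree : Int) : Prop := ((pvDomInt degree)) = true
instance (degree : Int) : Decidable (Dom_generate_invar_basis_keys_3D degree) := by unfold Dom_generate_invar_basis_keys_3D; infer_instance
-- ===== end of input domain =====

-- B is a different algorithm: it precomputes the (l,m) pair list, enumerates in
-- (l1,m1),(l2,m2) pair order deriving l3 from the m-sum, and sorts once at the end
-- (alternative decomposition; no speed claim).

-- ===== PORT A =====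
-- Literal port of A: five nested for-loops as foldl's, appending when -l3 <= m3 <= l3.
def generate_invar_basis_keys_3D (degree : Int) : List (List Int) :=
  (PySem.List.pyRange 0 (degree + 1) 1).foldl (fun keys l1 =>
    (PySem.List.pyRange 0 (degree + 1 - l1) 1).foldl (fun keys l2 =>
      (PySem.List.pyRange 0 (degree + 1 - l1 - l2) 1).foldl (fun keys l3 =>
        (PySem.List.pyRange (-l1) (l1 + 1) 1).foldl (fun keys m1 =>
          (PySem.List.pyRange (-l2) (l2 + 1) 1).foldl (fun keys m2 =>
            if -l3 ≤ -(m1 + m2) ∧ -(m1 + m2) ≤ l3 then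
              keys ++ [[l1, l2, l3, m1, m2, -(m1 + m2)]]
            else keys) keys) keys) keys) keys) []

-- ===== PORT B =====
-- B-side helper: the precomputed (l, m) pair list ('pairs' in Source B).
def pvPairs (degree : Int) : List (Int × Int) :=
  (PySem.List.pyRange 0 (degree + 1) 1).flatMap (fun l =>
    (PySem.List.pyRange (-l) (l + 1) 1).map (fun m => (l, m)))

-- Literal port of B: loop over pairs × pairs with l3 derived from abs(m1+m2),
-- accumulate, then one final sort (Python's keys.sort(), key = identity).
def generate_invar_basis_keys_3D_alt (degree : Int) : List (List Int) :=
  PySem.List.sorted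
    ((pvPairs degree).foldl (fun keys p1 =>
      (pvPairs degree).foldl (fun keys p2 =>
        (PySem.List.pyRange (|p1.2 + p2.2|) (degree + 1 - p1.1 - p2.1) 1).foldl
          (fun keys l3 => keys ++ [[p1.1, p2.1, l3, p1.2, p2.2, -(p1.2 + p2.2)]]) keys)
        keys) [])
    (fun x => x)

-- ===== PRECONDITION & SPEC =====
def Spec_generate_invar_basis_keys_3D (degree : Int) (out : List (List Int)) : Prop := out = generate_invar_basis_keys_3D_alt degree
instance (degree : Int) (out : List (List Int)) : Decidable (Spec_generate_invar_basis_keys_3D degree out) := by unfold Spec_generate_invar_basis_keys_3D; infer_instance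

-- ===== CLAIM (what is proved, stated in full; the proofs are below) =====
def Claim_equal_generate_invar_basis_keys_3D : Prop := ∀ (degree : Int), Dom_generate_invar_basis_keys_3D degree → Spec_generate_invar_basis_keys_3D degree (generate_invar_basis_keys_3D degree)

-- ===== LEMMAS AND PROOFS =====

-- The emitted tuple, and A's loop body as a guarded singleton.
def pvT (l1 l2 l3 m1 m2 : Int) : List Int := [l1, l2, l3, m1, m2, -(m1 + m2)]

def pvG (l1 l2 l3 m1 m2 : Int) : List (List Int) :=
  if -l3 ≤ -(m1 + m2) ∧ -(m1 + m2) ≤ l3 then [pvT l1 l2 l3 m1 m2] else []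

-- A's output in nested-flatMap normal form (loop order l1,l2,l3,m1,m2).
def pvA (d : Int) : List (List Int) :=
  (PySem.List.pyRange 0 (d + 1) 1).flatMap (fun l1 =>
    (PySem.List.pyRange 0 (d + 1 - l1) 1).flatMap (fun l2 =>
      (PySem.List.pyRange 0 (d + 1 - l1 - l2) 1).flatMap (fun l3 =>
        (PySem.List.pyRange (-l1) (l1 + 1) 1).flatMap (fun m1 =>
          (PySem.List.pyRange (-l2) (l2 + 1) 1).flatMap (fun m2 =>
            pvG l1 l2 l3 m1 m2)))))

-- B's pre-sort list in nested-flatMap normal form (loop order l1,m1,l2,m2,l3).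
def pvBP (d : Int) : List (List Int) :=
  (PySem.List.pyRange 0 (d + 1) 1).flatMap (fun l1 =>
    (PySem.List.pyRange (-l1) (l1 + 1) 1).flatMap (fun m1 =>
      (PySem.List.pyRange 0 (d + 1) 1).flatMap (fun l2 =>
        (PySem.List.pyRange (-l2) (l2 + 1) 1).flatMap (fun m2 =>
          (PySem.List.pyRange (|m1 + m2|) (d + 1 - l1 - l2) 1).map (fun l3 =>
            pvT l1 l2 l3 m1 m2)))))

-- A fold whose body appends a block equals acc ++ flatMap.
theorem pv_foldl_lift {α β : Type} (xs : List β) (f : List α → β → List α) (g : β → List α)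
    (h : ∀ acc x, f acc x = acc ++ g x) (acc : List α) :
    xs.foldl f acc = acc ++ xs.flatMap g := by
  rw [show f = (fun acc x => acc ++ g x) from funext fun a => funext fun x => h a x,
      PySem.List.foldl_append_eq_flatMap]

-- Filtering a step-1 range by an interval condition yields the clamped range.
theorem pv_filter_range_interval (c d : Int) : ∀ (n : Nat) (a b : Int), (b - a).toNat = n →
    (PySem.List.pyRange a b 1).filter (fun m => decide (c ≤ m ∧ m ≤ d))
      = PySem.List.pyRange (max a c) (min (b - 1) d + 1) 1 := by
  intro n
  induction n with
  | zero =>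
    intro a b h
    rw [PySem.List.pyRange_one_eq_nil (by omega : b ≤ a),
        PySem.List.pyRange_one_eq_nil (by omega : min (b - 1) d + 1 ≤ max a c)]
    rfl
  | succ k ih =>
    intro a b h
    rw [PySem.List.pyRange_one_cons (by omega : a < b), List.filter_cons]
    by_cases hc : c ≤ a ∧ a ≤ d
    · rw [if_pos (by simpa using hc), ih (a + 1) b (by omega)]
      rw [show max (a + 1) c = a + 1 by omega, show max a c = a by omega,
          ← PySem.List.pyRange_one_cons (by omega : a < min (b - 1) d + 1)]
    · rw [if_neg (by simpa using hc), ih (a + 1) b (by omega)]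
      rcases (not_and_or.mp hc) with h1 | h1
      · rw [show max (a + 1) c = max a c by omega]
      · rw [PySem.List.pyRange_one_eq_nil (by omega : min (b - 1) d + 1 ≤ max (a + 1) c),
            PySem.List.pyRange_one_eq_nil (by omega : min (b - 1) d + 1 ≤ max a c)]

-- A step-1 range is strictly increasing.
theorem pv_range_pairwise : ∀ (n : Nat) (a b : Int), (b - a).toNat = n →
    (PySem.List.pyRange a b 1).Pairwise (· < ·) := by
  intro n
  induction n with
  | zero =>
    intro a b h
    rw [PySem.List.pyRange_one_eq_nil (by omega : b ≤ a)]
    exact List.Pairwise.nil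
  | succ k ih =>
    intro a b h
    rw [PySem.List.pyRange_one_cons (by omega : a < b)]
    refine List.Pairwise.cons (fun y hy => ?_) (ih (a + 1) b (by omega))
    have := (PySem.List.mem_pyRange_one).mp hy
    omega

-- A guarded-singleton flatMap is filter-then-map.
theorem pv_flatMap_guard {γ : Type} (p : Int → Prop) [DecidablePred p]
    (xs : List Int) (t : Int → γ) :
    xs.flatMap (fun x => if p x then [t x] else []) = (xs.filter (fun x => decide (p x))).map t := by
  induction xs with
  | nil => rfl
  | cons a l ih =>
    rw [List.flatMap_cons, List.filter_cons, ih]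
    by_cases hp : p a
    · rw [if_pos hp, if_pos (by simpa using hp)]; rfl
    · rw [if_neg hp, if_neg (by simpa using hp)]; rfl

-- Loop interchange: two independent flatMap layers commute up to permutation.
theorem pv_flatMap_swap {α β γ : Type} (xs : List α) (ys : List β) (f : α → β → List γ) :
    (xs.flatMap fun a => ys.flatMap fun b => f a b).Perm
      (ys.flatMap fun b => xs.flatMap fun a => f a b) := by
  induction xs with
  | nil => simp
  | cons a xs ih =>
    rw [List.flatMap_cons]
    exact (List.Perm.append_left _ ih).trans (List.flatMap_append_perm ys _ _)

-- Dropping the tail of a range on which the body is empty.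
theorem pv_trim {γ : Type} (c b : Int) (F : Int → List γ) (hc : 0 ≤ c) (hcb : c ≤ b)
    (h : ∀ x, c ≤ x → F x = []) :
    (PySem.List.pyRange 0 b 1).flatMap F = (PySem.List.pyRange 0 c 1).flatMap F := by
  have h2 : (PySem.List.pyRange c b 1).flatMap F = [] :=
    List.flatMap_eq_nil_iff.mpr (fun x hx => h x ((PySem.List.mem_pyRange_one).mp hx).1)
  rw [PySem.List.pyRange_one_append 0 c b hc hcb, List.flatMap_append, h2, List.append_nil]

-- B's clamped l3 range equals the full l3 range with A's guard.
theorem pv_l3_guard (l1 l2 m1 m2 b : Int) :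
    (PySem.List.pyRange (|m1 + m2|) b 1).map (fun l3 => pvT l1 l2 l3 m1 m2)
      = (PySem.List.pyRange 0 b 1).flatMap (fun l3 => pvG l1 l2 l3 m1 m2) := by
  unfold pvG
  rw [pv_flatMap_guard (fun l3 => -l3 ≤ -(m1 + m2) ∧ -(m1 + m2) ≤ l3) _ _,
      List.filter_congr (fun l3 hl3 => ?_),
      pv_filter_range_interval (|m1 + m2|) (b - 1) (b - 0).toNat 0 b (by omega)]
  · rw [show max 0 |m1 + m2| = |m1 + m2| from max_eq_right (abs_nonneg _),
        show min (b - 1) (b - 1) + 1 = b by omega]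
  · show decide (-l3 ≤ -(m1 + m2) ∧ -(m1 + m2) ≤ l3)
        = decide (|m1 + m2| ≤ l3 ∧ l3 ≤ b - 1)
    have hb := (PySem.List.mem_pyRange_one).mp hl3
    rw [decide_eq_decide]
    constructor
    · intro hg
      have habs := abs_le.mpr ⟨hg.1, hg.2⟩
      rw [abs_neg] at habs
      exact ⟨habs, by omega⟩
    · intro hg
      have := abs_le.mp (show |-(m1 + m2)| ≤ l3 by rw [abs_neg]; exact hg.1)
      exact ⟨this.1, this.2⟩

-- ---- A's foldl chain lifted level by level ----
theorem pvA_m2 (l1 l2 l3 m1 : Int) (keys : List (List Int)) :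
    (PySem.List.pyRange (-l2) (l2 + 1) 1).foldl (fun keys m2 =>
        if -l3 ≤ -(m1 + m2) ∧ -(m1 + m2) ≤ l3 then
          keys ++ [[l1, l2, l3, m1, m2, -(m1 + m2)]]
        else keys) keys
      = keys ++ (PySem.List.pyRange (-l2) (l2 + 1) 1).flatMap (fun m2 => pvG l1 l2 l3 m1 m2) :=
  pv_foldl_lift _ _ _ (fun acc m2 => by unfold pvG pvT; split <;> simp) keys

theorem pvA_m1 (l1 l2 l3 : Int) (keys : List (List Int)) :
    (PySem.List.pyRange (-l1) (l1 + 1) 1).foldl (fun keys m1 =>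
        (PySem.List.pyRange (-l2) (l2 + 1) 1).foldl (fun keys m2 =>
          if -l3 ≤ -(m1 + m2) ∧ -(m1 + m2) ≤ l3 then
            keys ++ [[l1, l2, l3, m1, m2, -(m1 + m2)]]
          else keys) keys) keys
      = keys ++ (PySem.List.pyRange (-l1) (l1 + 1) 1).flatMap (fun m1 =>
          (PySem.List.pyRange (-l2) (l2 + 1) 1).flatMap (fun m2 => pvG l1 l2 l3 m1 m2)) :=
  pv_foldl_lift _ _ _ (fun acc m1 => pvA_m2 l1 l2 l3 m1 acc) keys

theorem pvA_l3 (d l1 l2 : Int) (keys : List (List Int)) :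
    (PySem.List.pyRange 0 (d + 1 - l1 - l2) 1).foldl (fun keys l3 =>
        (PySem.List.pyRange (-l1) (l1 + 1) 1).foldl (fun keys m1 =>
          (PySem.List.pyRange (-l2) (l2 + 1) 1).foldl (fun keys m2 =>
            if -l3 ≤ -(m1 + m2) ∧ -(m1 + m2) ≤ l3 then
              keys ++ [[l1, l2, l3, m1, m2, -(m1 + m2)]]
            else keys) keys) keys) keys
      = keys ++ (PySem.List.pyRange 0 (d + 1 - l1 - l2) 1).flatMap (fun l3 =>
          (PySem.List.pyRange (-l1) (l1 + 1) 1).flatMap (fun m1 =>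
            (PySem.List.pyRange (-l2) (l2 + 1) 1).flatMap (fun m2 => pvG l1 l2 l3 m1 m2))) :=
  pv_foldl_lift _ _ _ (fun acc l3 => pvA_m1 l1 l2 l3 acc) keys

theorem pvA_l2 (d l1 : Int) (keys : List (List Int)) :
    (PySem.List.pyRange 0 (d + 1 - l1) 1).foldl (fun keys l2 =>
        (PySem.List.pyRange 0 (d + 1 - l1 - l2) 1).foldl (fun keys l3 =>
          (PySem.List.pyRange (-l1) (l1 + 1) 1).foldl (fun keys m1 =>
            (PySem.List.pyRange (-l2) (l2 + 1) 1).foldl (fun keys m2 =>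
              if -l3 ≤ -(m1 + m2) ∧ -(m1 + m2) ≤ l3 then
                keys ++ [[l1, l2, l3, m1, m2, -(m1 + m2)]]
              else keys) keys) keys) keys) keys
      = keys ++ (PySem.List.pyRange 0 (d + 1 - l1) 1).flatMap (fun l2 =>
          (PySem.List.pyRange 0 (d + 1 - l1 - l2) 1).flatMap (fun l3 =>
            (PySem.List.pyRange (-l1) (l1 + 1) 1).flatMap (fun m1 =>
              (PySem.List.pyRange (-l2) (l2 + 1) 1).flatMap (fun m2 => pvG l1 l2 l3 m1 m2)))) :=
  pv_foldl_lift _ _ _ (fun acc l2 => pvA_l3 d l1 l2 acc) keys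

theorem pvA_eq (d : Int) : generate_invar_basis_keys_3D d = pvA d := by
  unfold generate_invar_basis_keys_3D pvA
  rw [pv_foldl_lift _ _ _ (fun acc l1 => pvA_l2 d l1 acc) []]
  rfl

-- ---- B's foldl chain lifted level by level ----
theorem pvB_l3 (d : Int) (p1 p2 : Int × Int) (keys : List (List Int)) :
    (PySem.List.pyRange (|p1.2 + p2.2|) (d + 1 - p1.1 - p2.1) 1).foldl
        (fun keys l3 => keys ++ [[p1.1, p2.1, l3, p1.2, p2.2, -(p1.2 + p2.2)]]) keys
      = keys ++ (PySem.List.pyRange (|p1.2 + p2.2|) (d + 1 - p1.1 - p2.1) 1).map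
          (fun l3 => pvT p1.1 p2.1 l3 p1.2 p2.2) := by
  rw [pv_foldl_lift (PySem.List.pyRange (|p1.2 + p2.2|) (d + 1 - p1.1 - p2.1) 1)
        (fun keys l3 => keys ++ [[p1.1, p2.1, l3, p1.2, p2.2, -(p1.2 + p2.2)]])
        (fun l3 => [pvT p1.1 p2.1 l3 p1.2 p2.2]) (fun acc l3 => rfl) keys,
      ← List.map_eq_flatMap]

theorem pvB_p2 (d : Int) (p1 : Int × Int) (keys : List (List Int)) :
    (pvPairs d).foldl (fun keys p2 =>
        (PySem.List.pyRange (|p1.2 + p2.2|) (d + 1 - p1.1 - p2.1) 1).foldl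
          (fun keys l3 => keys ++ [[p1.1, p2.1, l3, p1.2, p2.2, -(p1.2 + p2.2)]]) keys) keys
      = keys ++ (pvPairs d).flatMap (fun p2 =>
          (PySem.List.pyRange (|p1.2 + p2.2|) (d + 1 - p1.1 - p2.1) 1).map
            (fun l3 => pvT p1.1 p2.1 l3 p1.2 p2.2)) :=
  pv_foldl_lift _ _ _ (fun acc p2 => pvB_l3 d p1 p2 acc) keys

theorem pvBP_eq (d : Int) :
    generate_invar_basis_keys_3D_alt d = PySem.List.sorted (pvBP d) (fun x => x) := by
  unfold generate_invar_basis_keys_3D_alt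
  rw [pv_foldl_lift _ _ _ (fun acc p1 => pvB_p2 d p1 acc) []]
  unfold pvPairs pvBP
  simp only [List.flatMap_assoc, List.flatMap_map, List.nil_append]

-- ---- Permutation: B's pre-sort list is a rearrangement of A's output ----
theorem pvPerm (d : Int) : (pvBP d).Perm (pvA d) := by
  unfold pvBP pvA
  refine List.Perm.flatMap_left _ (fun l1 hl1 => ?_)
  have hl1' := (PySem.List.mem_pyRange_one).mp hl1
  -- innermost clamped range → full range with guard
  simp only [pv_l3_guard]
  -- trim the full l2 range to [0, d+1-l1): the body is empty beyond
  rw [show (fun m1 => (PySem.List.pyRange 0 (d + 1) 1).flatMap (fun l2 =>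
        (PySem.List.pyRange (-l2) (l2 + 1) 1).flatMap (fun m2 =>
          (PySem.List.pyRange 0 (d + 1 - l1 - l2) 1).flatMap (fun l3 => pvG l1 l2 l3 m1 m2))))
      = (fun m1 => (PySem.List.pyRange 0 (d + 1 - l1) 1).flatMap (fun l2 =>
        (PySem.List.pyRange (-l2) (l2 + 1) 1).flatMap (fun m2 =>
          (PySem.List.pyRange 0 (d + 1 - l1 - l2) 1).flatMap (fun l3 => pvG l1 l2 l3 m1 m2))))
      from funext fun m1 => pv_trim (d + 1 - l1) (d + 1) _ (by omega) (by omega)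
        (fun l2 hl2 => by
          rw [PySem.List.pyRange_one_eq_nil (by omega : d + 1 - l1 - l2 ≤ 0)]
          simp)]
  -- three loop interchanges: (m1,l2,m2,l3) → (m1,l2,l3,m2) → (l2,m1,l3,m2) → (l2,l3,m1,m2)
  refine ((List.Perm.flatMap_left _ (fun m1 _ => List.Perm.flatMap_left _ (fun l2 _ =>
      pv_flatMap_swap _ _ (fun m2 l3 => pvG l1 l2 l3 m1 m2)))).trans
    ((pv_flatMap_swap _ _ (fun m1 l2 =>
      (PySem.List.pyRange 0 (d + 1 - l1 - l2) 1).flatMap (fun l3 =>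
        (PySem.List.pyRange (-l2) (l2 + 1) 1).flatMap (fun m2 => pvG l1 l2 l3 m1 m2)))).trans
    (List.Perm.flatMap_left _ (fun l2 _ =>
      pv_flatMap_swap _ _ (fun m1 l3 =>
        (PySem.List.pyRange (-l2) (l2 + 1) 1).flatMap (fun m2 => pvG l1 l2 l3 m1 m2))))))

-- ---- A's output is strictly increasing in the lexicographic list order ----
theorem pv_lex_append (pre u v : List Int) (h : u < v) : pre ++ u < pre ++ v := by
  induction pre with
  | nil => simpa
  | cons a t ih => exact List.cons_lt_cons_self.mpr ih

theorem pv_pairwise_level (xs : List Int) (g : Int → List (List Int)) (pre : List Int)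
    (hx : xs.Pairwise (· < ·))
    (hshape : ∀ x ∈ xs, ∀ v ∈ g x, ∃ t, v = pre ++ x :: t)
    (hp : ∀ x ∈ xs, (g x).Pairwise (· < ·)) :
    (xs.flatMap g).Pairwise (· < ·) := by
  rw [List.pairwise_flatMap]
  refine ⟨hp, List.Pairwise.imp_of_mem (fun {a b} ha hb hab u hu v hv => ?_) hx⟩
  obtain ⟨t, rfl⟩ := hshape a ha u hu
  obtain ⟨s, rfl⟩ := hshape b hb v hv
  exact pv_lex_append pre _ _ (List.Lex.rel hab)

theorem pv_mem_pvG {v : List Int} {l1 l2 l3 m1 m2 : Int} (h : v ∈ pvG l1 l2 l3 m1 m2) :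
    v = pvT l1 l2 l3 m1 m2 := by
  unfold pvG at h
  split at h <;> simp_all

theorem pvP4 (l1 l2 l3 m1 : Int) :
    ((PySem.List.pyRange (-l2) (l2 + 1) 1).flatMap (fun m2 => pvG l1 l2 l3 m1 m2)).Pairwise (· < ·) :=
  pv_pairwise_level _ _ [l1, l2, l3, m1] (pv_range_pairwise _ _ _ rfl)
    (fun m2 _ v hv => ⟨[-(m1 + m2)], by rw [pv_mem_pvG hv]; rfl⟩)
    (fun m2 _ => by unfold pvG; split
                    · exact List.pairwise_singleton _ _
                    · exact List.Pairwise.nil)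

theorem pvP3 (l1 l2 l3 : Int) :
    ((PySem.List.pyRange (-l1) (l1 + 1) 1).flatMap (fun m1 =>
      (PySem.List.pyRange (-l2) (l2 + 1) 1).flatMap (fun m2 => pvG l1 l2 l3 m1 m2))).Pairwise (· < ·) :=
  pv_pairwise_level _ _ [l1, l2, l3] (pv_range_pairwise _ _ _ rfl)
    (fun m1 _ v hv => by
      obtain ⟨m2, _, hv2⟩ := List.mem_flatMap.mp hv
      exact ⟨[m2, -(m1 + m2)], by rw [pv_mem_pvG hv2]; rfl⟩)
    (fun m1 _ => pvP4 l1 l2 l3 m1)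

theorem pvP2 (d l1 l2 : Int) :
    ((PySem.List.pyRange 0 (d + 1 - l1 - l2) 1).flatMap (fun l3 =>
      (PySem.List.pyRange (-l1) (l1 + 1) 1).flatMap (fun m1 =>
        (PySem.List.pyRange (-l2) (l2 + 1) 1).flatMap (fun m2 => pvG l1 l2 l3 m1 m2)))).Pairwise (· < ·) :=
  pv_pairwise_level _ _ [l1, l2] (pv_range_pairwise _ _ _ rfl)
    (fun l3 _ v hv => by
      obtain ⟨m1, _, hv1⟩ := List.mem_flatMap.mp hv
      obtain ⟨m2, _, hv2⟩ := List.mem_flatMap.mp hv1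
      exact ⟨[m1, m2, -(m1 + m2)], by rw [pv_mem_pvG hv2]; rfl⟩)
    (fun l3 _ => pvP3 l1 l2 l3)

theorem pvP1 (d l1 : Int) :
    ((PySem.List.pyRange 0 (d + 1 - l1) 1).flatMap (fun l2 =>
      (PySem.List.pyRange 0 (d + 1 - l1 - l2) 1).flatMap (fun l3 =>
        (PySem.List.pyRange (-l1) (l1 + 1) 1).flatMap (fun m1 =>
          (PySem.List.pyRange (-l2) (l2 + 1) 1).flatMap (fun m2 => pvG l1 l2 l3 m1 m2))))).Pairwise (· < ·) :=
  pv_pairwise_level _ _ [l1] (pv_range_pairwise _ _ _ rfl)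
    (fun l2 _ v hv => by
      obtain ⟨l3, _, hv1⟩ := List.mem_flatMap.mp hv
      obtain ⟨m1, _, hv2⟩ := List.mem_flatMap.mp hv1
      obtain ⟨m2, _, hv3⟩ := List.mem_flatMap.mp hv2
      exact ⟨[l3, m1, m2, -(m1 + m2)], by rw [pv_mem_pvG hv3]; rfl⟩)
    (fun l2 _ => pvP2 d l1 l2)

theorem pvP0 (d : Int) : (pvA d).Pairwise (· < ·) := by
  unfold pvA
  exact pv_pairwise_level _ _ [] (pv_range_pairwise _ _ _ rfl)
    (fun l1 _ v hv => by
      obtain ⟨l2, _, hv1⟩ := List.mem_flatMap.mp hv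
      obtain ⟨l3, _, hv2⟩ := List.mem_flatMap.mp hv1
      obtain ⟨m1, _, hv3⟩ := List.mem_flatMap.mp hv2
      obtain ⟨m2, _, hv4⟩ := List.mem_flatMap.mp hv3
      exact ⟨[l2, l3, m1, m2, -(m1 + m2)], by rw [pv_mem_pvG hv4]; rfl⟩)
    (fun l1 _ => pvP1 d l1)

-- ===== VERDICT (by name: the statement is the Claim_ definition above) =====
theorem generate_invar_basis_keys_3D_spec : Claim_equal_generate_invar_basis_keys_3D := by
  intro d _
  show generate_invar_basis_keys_3D d = generate_invar_basis_keys_3D_alt d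
  rw [pvA_eq, pvBP_eq]
  have h := (PySem.List.sorted_eq_of_perm_of_pairwise_lt (pvBP d) (pvA d) (fun x => x)
    (pvPerm d).symm (pvP0 d)).symm
  convert h using 2
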